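-- pv_equiv track=rewrite | github.com/roussineau/IP-Algo1 | guia-10-resolucion.py | empiezaCon
-- ===== SOURCE A (Python) =====
-- def empiezaCon(cadena: str, caracter: str) -> bool:
--     for c in cadena:
--         if c == " ":
--             continue
--         elif c == caracter:
--             return True
--         else:
--             return False
-- ===== SOURCE B (Python) =====
-- def empiezaCon(cadena: str, caracter: str) -> bool:
--     # Right-to-left fold: res holds the answer for the suffix processed so far.
--     # A space keeps the suffix's answer (it would be skipped as leading space);
--     # any non-space character resets the answer to (c == caracter).
--     res = False
--     for c in reversed(cadena):
--         if c != " ":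
--             res = (c == caracter)
--     return res
-- ===== Notes on version B (the rewrite author's own statement) =====
-- stated objective: alternative
-- what changed: Replaced A's left-to-right early-returning skip-spaces-then-test scan by a right-to-left full fold that maintains the answer for the current suffix (spaces preserve the accumulator, non-spaces reset it), with no skip phase and no early exit.
-- outside the precondition, e.g. on empiezaCon('   ', 'a'): A returns None, B returns False; on empiezaCon('', 'a'): A returns None, B returns False
import Mathlib
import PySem

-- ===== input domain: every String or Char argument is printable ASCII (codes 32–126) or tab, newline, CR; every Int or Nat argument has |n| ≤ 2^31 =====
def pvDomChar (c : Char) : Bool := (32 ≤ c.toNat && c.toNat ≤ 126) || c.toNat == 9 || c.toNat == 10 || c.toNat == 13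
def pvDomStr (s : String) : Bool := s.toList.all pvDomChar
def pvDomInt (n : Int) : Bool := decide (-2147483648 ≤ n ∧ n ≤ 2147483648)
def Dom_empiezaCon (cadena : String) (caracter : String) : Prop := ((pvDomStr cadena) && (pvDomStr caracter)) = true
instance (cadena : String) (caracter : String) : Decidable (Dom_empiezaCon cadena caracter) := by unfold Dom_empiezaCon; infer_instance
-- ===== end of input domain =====

-- B replaces A's left-to-right early-returning scan by a right-to-left fold whose
-- accumulator is the answer for the suffix seen so far (objective: alternative).

-- ===== PORT A =====
-- A's loop: skip spaces, on the first non-space return (c == caracter); falling off the end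
-- (empty / all-space input) returns None in Python — excluded by Pre_; the port returns false there.
def empiezaConGo : List Char → String → Bool
  | [], _ => false
  | c :: rest, caracter =>
    if c = ' ' then empiezaConGo rest caracter
    else if String.singleton c = caracter then true else false

def empiezaCon (cadena : String) (caracter : String) : Bool :=
  empiezaConGo cadena.toList caracter

-- ===== PORT B =====
-- Source B's reversed-iteration loop with accumulator res, as a foldl over the reversed list.
def empiezaCon_alt (cadena : String) (caracter : String) : Bool :=
  cadena.toList.reverse.foldl
    (fun res c => if c ≠ ' ' then decide (String.singleton c = caracter) else res) false

-- ===== PRECONDITION & SPEC =====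
-- Pre_ excludes empty/all-space strings, on which Python A falls off the loop and returns None (not a bool).
def Pre_empiezaCon (cadena : String) (caracter : String) : Prop :=
  cadena.toList.any (fun c => c ≠ ' ') = true
instance (cadena : String) (caracter : String) : Decidable (Pre_empiezaCon cadena caracter) := by
  unfold Pre_empiezaCon; infer_instance

def pvWitness_empiezaCon : String × String := ("  hola", "h")

def Spec_empiezaCon (cadena : String) (caracter : String) (out : Bool) : Prop := out = empiezaCon_alt cadena caracter
instance (cadena : String) (caracter : String) (out : Bool) : Decidable (Spec_empiezaCon cadena caracter out) := by unfold Spec_empiezaCon; infer_instance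

-- ===== CLAIM =====
def Claim_equal_empiezaCon : Prop := ∀ (cadena : String) (caracter : String), Dom_empiezaCon cadena caracter → Pre_empiezaCon cadena caracter → Spec_empiezaCon cadena caracter (empiezaCon cadena caracter)

-- ===== LEMMAS AND PROOFS =====
-- The right-to-left fold computes the same value as A's left-to-right scan on every list
-- (both give false on empty/all-space input).
theorem empiezaConGo_eq_foldr (l : List Char) (caracter : String) :
    empiezaConGo l caracter =
      l.foldr (fun c res => if c ≠ ' ' then decide (String.singleton c = caracter) else res) false := by
  induction l with
  | nil => rfl
  | cons c rest ih =>
    by_cases h : c = ' '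
    · simp [empiezaConGo, h, ih]
    · simp [empiezaConGo, h]

-- ===== VERDICT =====
theorem empiezaCon_spec : Claim_equal_empiezaCon := by
  intro cadena caracter _ _
  unfold Spec_empiezaCon empiezaCon empiezaCon_alt
  rw [List.foldl_reverse]
  exact empiezaConGo_eq_foldr _ _
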